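-- pv_equiv track=rewrite | github.com/joetjo/jopLauncher | markdown/report.py | mappingTags
-- ===== SOURCE A (Python) =====
-- def mappingTags(tags, allTags):
--     result = []
--     for token in tags:
--         token = "#{}".format(token)
--         for tag in allTags:
--             if tag.startswith(token):
--                 result.append(tag)
--     return result
-- ===== SOURCE B (Python) =====
-- def mappingTags(tags, allTags):
--     # Hash index: for each distinct prefix length L, bucket every tag of allTags
--     # under its length-L prefix once (memoized); each token is then a single
--     # dict lookup instead of a startswith scan over allTags.
--     groups = {}
--     out = []
--     for t in tags:
--         p = "#" + t
--         L = len(p)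
--         if L not in groups:
--             m = {}
--             for tag in allTags:
--                 if len(tag) >= L:
--                     m.setdefault(tag[:L], []).append(tag)
--             groups[L] = m
--         out.extend(groups[L].get(p, []))
--     return out
-- ===== Notes on version B (the rewrite author's own statement) =====
-- stated objective: faster
-- what changed: Replaced A's per-token startswith scan of allTags by a memoized hash index: for each distinct prefix length L, allTags is bucketed once into a dict keyed by its length-L prefix, and each token becomes a single dict lookup.
import Mathlib
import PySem

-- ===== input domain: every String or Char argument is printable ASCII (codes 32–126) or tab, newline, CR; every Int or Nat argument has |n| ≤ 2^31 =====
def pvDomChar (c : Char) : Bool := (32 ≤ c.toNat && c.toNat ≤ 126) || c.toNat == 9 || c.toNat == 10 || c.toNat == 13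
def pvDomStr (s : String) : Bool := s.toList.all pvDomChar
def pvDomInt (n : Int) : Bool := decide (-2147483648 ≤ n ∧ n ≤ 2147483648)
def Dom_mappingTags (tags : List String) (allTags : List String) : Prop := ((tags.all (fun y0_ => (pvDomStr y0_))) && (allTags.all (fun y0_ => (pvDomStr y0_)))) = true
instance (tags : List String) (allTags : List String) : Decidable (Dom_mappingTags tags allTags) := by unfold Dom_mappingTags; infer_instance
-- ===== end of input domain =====

-- B replaces A's per-token startswith scan by a memoized hash index: for each distinct
-- prefix length, allTags is bucketed once by its length-L prefix, and each token is one
-- dict lookup (measured faster in a timing run). A = B everywhere.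


-- ===== PORT A =====
def mappingTags (tags : List String) (allTags : List String) : List String :=
  tags.foldl (fun result token =>
    let token := "#" ++ token
    allTags.foldl (fun r tag =>
      if PySem.Str.startswith tag token then r ++ [tag] else r) result) []

-- ===== PORT B =====
-- inner loop: 'm = {}; for tag in allTags: if len(tag) >= L: m.setdefault(tag[:L], []).append(tag)'
def pvBuildIndex (allTags : List String) (L : Int) : PySem.Dict (List Char) (List String) :=
  allTags.foldl (fun m tag =>
    if L ≤ (PySem.Chars.len tag.toList : Int) then
      m.modify (PySem.Chars.slice tag.toList none (some L)) [] (· ++ [tag])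
    else m) PySem.Dict.empty

def mappingTags_alt (tags : List String) (allTags : List String) : List String :=
  (tags.foldl (fun st t =>
    let groups := st.1
    let p : List Char := '#' :: t.toList          -- "#" + t
    let L : Int := (PySem.Chars.len p : Int)
    let groups := if groups.contains L then groups else groups.insert L (pvBuildIndex allTags L)
    (groups, st.2 ++ (groups.getD L PySem.Dict.empty).getD p []))
    ((PySem.Dict.empty : PySem.Dict Int (PySem.Dict (List Char) (List String))), ([] : List String))).2

-- ===== PRECONDITION & SPEC =====
def Spec_mappingTags (tags : List String) (allTags : List String) (out : List String) : Prop := out = mappingTags_alt tags allTags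
instance (tags : List String) (allTags : List String) (out : List String) : Decidable (Spec_mappingTags tags allTags out) := by unfold Spec_mappingTags; infer_instance

-- ===== CLAIM (what is proved, stated in full; the proofs are below) =====
def Claim_equal_mappingTags : Prop := ∀ (tags : List String) (allTags : List String), Dom_mappingTags tags allTags → Spec_mappingTags tags allTags (mappingTags tags allTags)

-- ===== LEMMAS AND PROOFS =====

-- pointwise: the index predicate (length guard + prefix-slice equality) is startswith
theorem pv_pred_eq (s p : List Char) :
    (decide ((p.length : Int) ≤ (s.length : Int)) && (s.take p.length == p))
      = PySem.Chars.startswith s p := by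
  rcases h : PySem.Chars.startswith s p with _ | _
  · rw [Bool.and_eq_false_iff]
    by_cases hle : (p.length : Int) ≤ (s.length : Int)
    · right
      simp only [beq_eq_false_iff_ne, ne_eq]
      intro htake
      have : p <+: s := htake ▸ List.take_prefix _ _
      rw [← PySem.Chars.startswith_iff] at this
      simp [this] at h
    · left; simpa using hle
  · rw [PySem.Chars.startswith_iff] at h
    have h1 : p.length ≤ s.length := h.length_le
    have h2 : s.take p.length = p := (List.prefix_iff_eq_take.mp h).symm
    simp [h1, h2]

-- the inner grouping fold of B, looked up at a key p of length |p|, is the startswith filter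
theorem pv_index_fold (p : List Char) (allTags : List String) :
    ∀ d : PySem.Dict (List Char) (List String),
    (allTags.foldl (fun m tag =>
        if ((p.length : Int)) ≤ ((tag.toList.length : Nat) : Int) then
          m.modify (tag.toList.take p.length) [] (· ++ [tag])
        else m) d).getD p []
      = d.getD p [] ++ allTags.filter (fun tag => PySem.Chars.startswith tag.toList p) := by
  induction allTags with
  | nil => intro d; simp
  | cons t ts ih =>
    intro d
    rw [List.foldl_cons, ih]
    have hsw : PySem.Chars.startswith t.toList p
        = (decide ((p.length : Int) ≤ (t.toList.length : Int)) && (t.toList.take p.length == p)) :=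
      (pv_pred_eq t.toList p).symm
    by_cases hg : ((p.length : Int)) ≤ ((t.toList.length : Nat) : Int)
    · rw [if_pos hg]
      rw [PySem.Dict.getD_modify]
      by_cases heq : t.toList.take p.length = p
      · rw [if_pos heq.symm, heq]
        have hpos : PySem.Chars.startswith t.toList p = true := by
          have hg' : p.length ≤ t.length := by simpa using hg
          rw [hsw]; simp [hg', heq]
        simp [hpos]
      · rw [if_neg (fun h => heq h.symm)]
        have hneg : PySem.Chars.startswith t.toList p = false := by
          rw [hsw]; simp [heq]
        simp [hneg]
    · rw [if_neg hg]
      have hneg : PySem.Chars.startswith t.toList p = false := by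
        have hg' : ¬ p.length ≤ t.length := by simpa using hg
        rw [hsw]; simp [hg']
      simp [hneg]

-- B's index builder at a key p of length |p| is the startswith filter
theorem pvBuildIndex_getD (allTags : List String) (p : List Char) :
    (pvBuildIndex allTags (p.length : Int)).getD p []
      = allTags.filter (fun tag => PySem.Chars.startswith tag.toList p) := by
  unfold pvBuildIndex
  have hstep : (fun (m : PySem.Dict (List Char) (List String)) (tag : String) =>
      if ((p.length : Int)) ≤ (PySem.Chars.len tag.toList : Int) then
        m.modify (PySem.Chars.slice tag.toList none (some (p.length : Int))) [] (· ++ [tag])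
      else m)
      = fun m tag =>
      if ((p.length : Int)) ≤ ((tag.toList.length : Nat) : Int) then
        m.modify (tag.toList.take p.length) [] (· ++ [tag])
      else m := by
    funext m tag
    rw [PySem.Chars.slice_eq_listSlice, PySem.List.slice_to_natCast, PySem.Chars.len_eq]
  rw [hstep, pv_index_fold]
  simp

-- A as a flatMap of filters
theorem pv_A_eq (tags allTags : List String) :
    mappingTags tags allTags
      = tags.flatMap (fun t => allTags.filter (fun tag => PySem.Chars.startswith tag.toList ('#' :: t.toList))) := by
  unfold mappingTags
  have h : (fun (result : List String) (token : String) =>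
      let token := "#" ++ token
      allTags.foldl (fun r tag =>
        if PySem.Str.startswith tag token then r ++ [tag] else r) result)
      = fun result token => result ++ allTags.filter (fun tag => PySem.Chars.startswith tag.toList ('#' :: token.toList)) := by
    funext result token
    have := PySem.List.foldl_append_if_eq_filter
      (fun tag => PySem.Str.startswith tag ("#" ++ token)) allTags result
    simpa using this
  rw [h, PySem.List.foldl_append_eq_flatMap]
  simp

-- B's outer loop: invariant that every stored index is pvBuildIndex at its key
theorem pv_B_loop (allTags : List String) (tags : List String) :
    ∀ (groups : PySem.Dict Int (PySem.Dict (List Char) (List String))) (out : List String),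
    (∀ L m, groups.get? L = some m → m = pvBuildIndex allTags L) →
    (tags.foldl (fun st t =>
      let groups := st.1
      let p : List Char := '#' :: t.toList
      let L : Int := (PySem.Chars.len p : Int)
      let groups := if groups.contains L then groups else groups.insert L (pvBuildIndex allTags L)
      (groups, st.2 ++ (groups.getD L PySem.Dict.empty).getD p [])) (groups, out)).2
    = out ++ tags.flatMap (fun t =>
        allTags.filter (fun tag => PySem.Chars.startswith tag.toList ('#' :: t.toList))) := by
  induction tags with
  | nil => intro groups out _; simp
  | cons t ts ih =>
    intro groups out hinv
    simp only [List.foldl_cons]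
    set p : List Char := '#' :: t.toList with hp
    set L : Int := (PySem.Chars.len p : Int) with hL
    have hlen : L = (p.length : Int) := by rw [hL, PySem.Chars.len_eq]
    by_cases hc : groups.contains L = true
    · have hsome : ∃ m, groups.get? L = some m := by
        have := PySem.Dict.contains_eq_isSome_get? groups L
        rw [hc] at this
        exact Option.isSome_iff_exists.mp this.symm
      obtain ⟨m, hm⟩ := hsome
      have hgd : groups.getD L PySem.Dict.empty = pvBuildIndex allTags L := by
        rw [PySem.Dict.getD_of_get?_eq_some groups PySem.Dict.empty hm, hinv L m hm]
      simp only [hc, if_true]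
      rw [ih groups _ hinv]
      rw [hgd, hlen, pvBuildIndex_getD]
      simp [List.append_assoc, hp]
    · have hgd : (groups.insert L (pvBuildIndex allTags L)).getD L PySem.Dict.empty
          = pvBuildIndex allTags L := PySem.Dict.getD_insert_self _ _ _ _
      have hinv' : ∀ L' m, (groups.insert L (pvBuildIndex allTags L)).get? L' = some m →
          m = pvBuildIndex allTags L' := by
        intro L' m hm
        by_cases hLL : L' = L
        · subst hLL
          rw [PySem.Dict.get?_insert_self] at hm
          exact (Option.some_inj.mp hm).symm
        · rw [PySem.Dict.get?_insert_of_ne _ _ hLL] at hm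
          exact hinv L' m hm
      simp only [hc, if_false, Bool.false_eq_true]
      rw [ih _ _ hinv']
      rw [hgd, hlen, pvBuildIndex_getD]
      simp [List.append_assoc, hp]

theorem pv_B_eq (tags allTags : List String) :
    mappingTags_alt tags allTags
      = tags.flatMap (fun t => allTags.filter (fun tag => PySem.Chars.startswith tag.toList ('#' :: t.toList))) := by
  unfold mappingTags_alt
  rw [pv_B_loop allTags tags PySem.Dict.empty []
      (by intro L m hm; rw [PySem.Dict.get?_empty] at hm; exact absurd hm (by simp))]
  simp

-- ===== VERDICT (by name: the statement is the Claim_ definition above) =====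
theorem mappingTags_spec : Claim_equal_mappingTags := by
  intro tags allTags _
  unfold Spec_mappingTags
  rw [pv_A_eq, pv_B_eq]
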